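-- pv_equiv track=rewrite | github.com/GaryVermeulen/gdata | petri_dish/strain4/alGen1.py | getMutableCode
-- ===== SOURCE A (Python) =====
-- def getMutableCode(dnaFile):
--     # Butt ugly but works, ugh
--
--     found = False
--     startList = ['#/START']
--     endTag = "#/END"
--     mutableCode = []
--     block = []
--     curr = []
--
--     for i in startList:
--         for line in dnaFile:
--             if found:
--                 curr.append(line)
--                 if line.strip().startswith(endTag):
--                     found = False
--                     block.append(curr)
--                     curr = []                                # Zero out current list
--             else:
--                 if line.strip().startswith(i):            # If line starts with start delimiter
--                     found = True
--                     curr.append(line)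
--
--     if len(curr) > 0:      # If there are still lines in the current list
--         block.append(curr)
--
--     for i in block[0]:
--         mutableCode.append(i)
--
--     return mutableCode
-- ===== SOURCE B (Python) =====
-- def getMutableCode(dnaFile):
--     lines = list(dnaFile)
--     starts = [i for i, l in enumerate(lines) if l.strip().startswith('#/START')]
--     start = starts[0]
--     ends = [j for j in range(start + 1, len(lines))
--             if lines[j].strip().startswith('#/END')]
--     end = ends[0] if ends else len(lines) - 1
--     return lines[start:end + 1]
-- ===== Notes on version B (the rewrite author's own statement) =====
-- stated objective: simpler
-- what changed: Replaces the flag-driven state machine (found flag, block-of-blocks accumulator, trailing flush, copy loop) by direct index computation: first '#/START' line index, first '#/END' index strictly after it (or end of file), and one slice.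
import Mathlib
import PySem

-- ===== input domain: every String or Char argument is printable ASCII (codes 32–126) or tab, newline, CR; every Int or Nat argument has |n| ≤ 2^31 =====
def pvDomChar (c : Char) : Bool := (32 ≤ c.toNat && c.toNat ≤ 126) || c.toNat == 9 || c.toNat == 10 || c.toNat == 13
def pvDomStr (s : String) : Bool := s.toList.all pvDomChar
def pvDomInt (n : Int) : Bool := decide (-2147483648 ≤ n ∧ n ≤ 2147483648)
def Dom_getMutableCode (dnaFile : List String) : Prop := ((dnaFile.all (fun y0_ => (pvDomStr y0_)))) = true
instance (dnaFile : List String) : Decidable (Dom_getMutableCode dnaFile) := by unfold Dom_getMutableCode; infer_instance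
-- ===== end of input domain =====

-- B replaces A's flag-driven state machine (found flag, list-of-blocks accumulator, trailing
-- flush, final copy loop) by index computation: first '#/START' line, first '#/END' line strictly
-- after it (or end of file), one slice. Objective: simpler. Return-value equivalence only (neither
-- version mutates its argument).

-- shared helper: line.strip().startswith(tag), exactly the test both Pythons perform
def pvIsStart (l : String) : Bool := PySem.Str.startswith (PySem.Str.strip l) "#/START"
def pvIsEnd (l : String) : Bool := PySem.Str.startswith (PySem.Str.strip l) "#/END"

-- ===== PORT A =====
-- one loop step of A's inner 'for line in dnaFile' (state: found, block, curr); i = start delimiter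
def pvStepA (i : String) (st : Bool × List (List String) × List String) (line : String) :
    Bool × List (List String) × List String :=
  match st with
  | (found, block, curr) =>
    if found then
      let curr := curr ++ [line]
      if PySem.Str.startswith (PySem.Str.strip line) "#/END" then
        (false, block ++ [curr], [])
      else (true, block, curr)
    else
      if PySem.Str.startswith (PySem.Str.strip line) i then (true, block, curr ++ [line])
      else (false, block, curr)

def getMutableCode (dnaFile : List String) : List String :=
  let st := (["#/START"]).foldl (fun st i => dnaFile.foldl (pvStepA i) st) (false, ([], []))
  let block := if st.2.2.length > 0 then st.2.1 ++ [st.2.2] else st.2.1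
  -- block[0] raises IndexError when no start delimiter occurs; Pre_ excludes that
  ((PySem.List.pyGet? block 0).getD []).foldl (fun acc x => acc ++ [x]) []

-- ===== PORT B =====
def getMutableCode_alt (dnaFile : List String) : List String :=
  let lines := dnaFile
  let starts := ((PySem.List.enumerate lines).filter (fun p => pvIsStart p.2)).map (·.1)
  -- starts[0] raises IndexError when starts = []; Pre_ excludes that
  let start := (PySem.List.pyGet? starts 0).getD 0
  let ends := (PySem.List.pyRange (start + 1) (lines.length : Int) 1).filter
      (fun j => pvIsEnd ((PySem.List.pyGet? lines j).getD ""))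
  let endIdx := match ends with
    | e :: _ => e
    | [] => (lines.length : Int) - 1
  PySem.List.slice lines (some start) (some (endIdx + 1))

-- ===== PRECONDITION & SPEC =====
-- Pre_ excludes inputs with no line whose strip() starts with '#/START': there A (block[0]) and B
-- (starts[0]) both raise IndexError.
def Pre_getMutableCode (dnaFile : List String) : Prop := ∃ l ∈ dnaFile, pvIsStart l = true
instance (dnaFile : List String) : Decidable (Pre_getMutableCode dnaFile) := by
  unfold Pre_getMutableCode; infer_instance
def pvWitness_getMutableCode : List String := ["junk", " #/START a", "code", "#/END", "tail"]

def Spec_getMutableCode (dnaFile : List String) (out : List String) : Prop :=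
  out = getMutableCode_alt dnaFile
instance (dnaFile : List String) (out : List String) : Decidable (Spec_getMutableCode dnaFile out) := by
  unfold Spec_getMutableCode; infer_instance

-- ===== CLAIM (what is proved, stated in full; the proofs are below) =====
def Claim_equal_getMutableCode : Prop := ∀ (dnaFile : List String), Dom_getMutableCode dnaFile →
  Pre_getMutableCode dnaFile → Spec_getMutableCode dnaFile (getMutableCode dnaFile)

-- ===== LEMMAS AND PROOFS =====

-- reference extraction: from the first start line, everything up to and including the first
-- subsequent end line (or the rest of the file)
def pvTakeEnd : List String → List String
  | [] => []
  | l :: ls => l :: (if pvIsEnd l then [] else pvTakeEnd ls)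

def pvExtract : List String → List String
  | [] => []
  | l :: ls => if pvIsStart l then l :: pvTakeEnd ls else pvExtract ls

-- A's trailing-flush of curr into block
def pvBlockOf (st : Bool × List (List String) × List String) : List (List String) :=
  if st.2.2.length > 0 then st.2.1 ++ [st.2.2] else st.2.1

theorem pv_foldl_append (xs acc : List String) :
    xs.foldl (fun a x => a ++ [x]) acc = acc ++ xs := by
  induction xs generalizing acc with
  | nil => simp
  | cons x xs ih => simp [List.foldl, ih]

-- the four cases of A's loop step
theorem pvStepA_true_end {l : String} (b : List (List String)) (c : List String)
    (h : pvIsEnd l = true) :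
    pvStepA "#/START" (true, (b, c)) l = (false, (b ++ [c ++ [l]], [])) := by
  have h' : PySem.Str.startswith (PySem.Str.strip l) "#/END" = true := h
  simp only [pvStepA, h']
  simp

theorem pvStepA_true_noend {l : String} (b : List (List String)) (c : List String)
    (h : pvIsEnd l = false) :
    pvStepA "#/START" (true, (b, c)) l = (true, (b, c ++ [l])) := by
  have h' : PySem.Str.startswith (PySem.Str.strip l) "#/END" = false := h
  simp only [pvStepA, h']
  simp

theorem pvStepA_false_start {l : String} (b : List (List String)) (c : List String)
    (h : pvIsStart l = true) :
    pvStepA "#/START" (false, (b, c)) l = (true, (b, c ++ [l])) := by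
  have h' : PySem.Str.startswith (PySem.Str.strip l) "#/START" = true := h
  simp only [pvStepA, h']
  simp

theorem pvStepA_false_nostart {l : String} (b : List (List String)) (c : List String)
    (h : pvIsStart l = false) :
    pvStepA "#/START" (false, (b, c)) l = (false, (b, c)) := by
  have h' : PySem.Str.startswith (PySem.Str.strip l) "#/START" = false := h
  simp only [pvStepA, h']
  simp

-- A-side: once a first block b0 exists, the head of the final block list stays b0
theorem pvA_head_preserved (ls : List String) :
    ∀ (found : Bool) (b0 : List String) (bs : List (List String)) (curr : List String),
    (pvBlockOf (ls.foldl (pvStepA "#/START") (found, (b0 :: bs, curr)))).head? = some b0 := by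
  induction ls with
  | nil =>
    intro found b0 bs curr
    unfold pvBlockOf
    by_cases h : curr.length > 0 <;> simp [h]
  | cons l ls ih =>
    intro found b0 bs curr
    rw [List.foldl_cons]
    cases found with
    | true =>
      by_cases h : pvIsEnd l = true
      · rw [pvStepA_true_end _ _ h]
        exact ih false b0 (bs ++ [curr ++ [l]]) []
      · rw [pvStepA_true_noend _ _ (by simpa using h)]
        exact ih true b0 bs (curr ++ [l])
    | false =>
      by_cases h : pvIsStart l = true
      · rw [pvStepA_false_start _ _ h]
        exact ih true b0 bs (curr ++ [l])
      · rw [pvStepA_false_nostart _ _ (by simpa using h)]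
        exact ih false b0 bs curr

-- A-side: running in found state with no closed block yet yields first block curr ++ pvTakeEnd ls
theorem pvA_found_run (ls : List String) :
    ∀ (curr : List String), curr ≠ [] →
    (pvBlockOf (ls.foldl (pvStepA "#/START") (true, ([], curr)))).head? =
      some (curr ++ pvTakeEnd ls) := by
  induction ls with
  | nil =>
    intro curr hc
    unfold pvBlockOf
    simp [pvTakeEnd, List.length_pos_iff, hc]
  | cons l ls ih =>
    intro curr hc
    rw [List.foldl_cons]
    by_cases h : pvIsEnd l = true
    · rw [pvStepA_true_end _ _ h]
      rw [show ([] : List (List String)) ++ [curr ++ [l]] = [curr ++ [l]] from rfl]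
      rw [pvA_head_preserved ls false (curr ++ [l]) [] []]
      simp [pvTakeEnd, h]
    · rw [pvStepA_true_noend _ _ (by simpa using h)]
      rw [ih (curr ++ [l]) (by simp)]
      simp [pvTakeEnd, h]

-- A's result is the head block (or [] — excluded by Pre_)
theorem getMutableCode_eq (df : List String) :
    getMutableCode df =
      ((pvBlockOf (df.foldl (pvStepA "#/START") (false, ([], [])))).head?).getD [] := by
  unfold getMutableCode pvBlockOf
  simp only [List.foldl_cons, List.foldl_nil]
  rw [pv_foldl_append]
  rw [show (0 : Int) = ((0 : Nat) : Int) from rfl, PySem.List.pyGet?_natCast]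
  rw [← List.head?_eq_getElem?]
  simp

theorem pvA_eq_extract (df : List String) (hp : Pre_getMutableCode df) :
    getMutableCode df = pvExtract df := by
  induction df with
  | nil => exact absurd hp (by simp [Pre_getMutableCode])
  | cons l ls ih =>
    rw [getMutableCode_eq, List.foldl_cons]
    by_cases h : pvIsStart l = true
    · rw [pvStepA_false_start _ _ h]
      simp only [List.nil_append]
      rw [pvA_found_run ls [l] (by simp)]
      simp [pvExtract, h]
    · rw [pvStepA_false_nostart _ _ (by simpa using h)]
      have hp' : Pre_getMutableCode ls := by
        obtain ⟨x, hx, hxs⟩ := hp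
        rcases List.mem_cons.mp hx with h0 | hmem
        · subst h0; exact absurd hxs (by simp [h])
        · exact ⟨x, hmem, hxs⟩
      rw [← getMutableCode_eq, ih hp']
      simp [pvExtract, h]

-- characterisation of pvTakeEnd by the first end index
theorem pvTakeEnd_eq (ls : List String) :
    pvTakeEnd ls = match ls.findIdx? pvIsEnd with
      | some k => ls.take (k + 1)
      | none => ls := by
  induction ls with
  | nil => simp [pvTakeEnd]
  | cons l ls ih =>
    by_cases h : pvIsEnd l = true
    · simp [pvTakeEnd, h, List.findIdx?_cons]
    · simp only [pvTakeEnd, h, Bool.false_eq_true, if_false, List.findIdx?_cons]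
      rw [ih]
      cases ls.findIdx? pvIsEnd <;> simp

-- pvExtract via the first start index
theorem pvExtract_eq (df : List String) (s : Nat) (hs : df.findIdx? pvIsStart = some s) :
    pvExtract df = match df.drop s with
      | [] => []
      | l :: rest => l :: pvTakeEnd rest := by
  induction df generalizing s with
  | nil => simp at hs
  | cons l ls ih =>
    rw [List.findIdx?_cons] at hs
    by_cases h : pvIsStart l = true
    · simp only [h, if_true] at hs
      cases hs
      simp [pvExtract, h]
    · simp only [h, Bool.false_eq_true, if_false, Option.map_eq_some_iff] at hs
      obtain ⟨k, hk, rfl⟩ := hs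
      simp only [pvExtract, h, Bool.false_eq_true, if_false, List.drop_succ_cons]
      exact ih k hk

-- B-side: head of the start-index list is the first start index
theorem pvB_starts_head (df : List String) :
    ∀ (s : Int),
    ((((PySem.List.enumerate df s).filter (fun p => pvIsStart p.2)).map (·.1)).head?) =
      (df.findIdx? pvIsStart).map (fun k => s + (k : Int)) := by
  induction df with
  | nil => intro s; simp [PySem.List.enumerate_nil]
  | cons l ls ih =>
    intro s
    rw [PySem.List.enumerate_cons, List.findIdx?_cons]
    by_cases h : pvIsStart l = true
    · simp [h]
    · simp only [List.filter_cons, h, Bool.false_eq_true, if_false]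
      rw [ih (s + 1)]
      cases hfi : ls.findIdx? pvIsStart with
      | none => simp
      | some k => simp; omega

-- B-side: head of the filtered range is the first end index at or after position a
theorem pvB_ends_head (df : List String) (a : Nat) (ha : a ≤ df.length) :
    (((PySem.List.pyRange (a : Int) (df.length : Int) 1).filter
        (fun j => pvIsEnd ((PySem.List.pyGet? df j).getD ""))).head?) =
      ((df.drop a).findIdx? pvIsEnd).map (fun k => ((a + k : Nat) : Int)) := by
  by_cases heq : a = df.length
  · subst heq
    rw [PySem.List.pyRange_one_eq_nil (by omega)]
    simp
  · have hlt : a < df.length := lt_of_le_of_ne ha heq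
    rw [PySem.List.pyRange_one_cons (by exact_mod_cast hlt)]
    rw [List.drop_eq_getElem_cons hlt, List.findIdx?_cons]
    simp only [List.filter_cons]
    by_cases h : pvIsEnd df[a] = true
    · simp [List.getElem?_eq_getElem hlt, h]
    · rw [if_neg (by simp [List.getElem?_eq_getElem hlt, h]), if_neg (by simp [h])]
      have hrec := pvB_ends_head df (a + 1) (by omega)
      rw [show ((a : Int) + 1) = ((a + 1 : Nat) : Int) by push_cast; ring, hrec]
      cases hfi : (df.drop (a + 1)).findIdx? pvIsEnd with
      | none => simp
      | some k =>
        simp only [Option.map_some]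
        congr 1
        omega
  termination_by df.length - a

theorem pvB_eq_extract (df : List String) (hp : Pre_getMutableCode df) :
    getMutableCode_alt df = pvExtract df := by
  have hsome : (df.findIdx? pvIsStart).isSome := by
    rw [List.findIdx?_isSome]
    obtain ⟨x, hx, hxs⟩ := hp
    exact List.any_eq_true.mpr ⟨x, hx, hxs⟩
  obtain ⟨s, hs⟩ := Option.isSome_iff_exists.mp hsome
  have hslen : s < df.length := (List.findIdx?_eq_some_iff_findIdx_eq.mp hs).1
  unfold getMutableCode_alt
  have hstart : ((((PySem.List.enumerate df 0).filter (fun p => pvIsStart p.2)).map (·.1)).head?) =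
      some ((s : Int)) := by
    rw [pvB_starts_head df 0, hs]; simp
  have hget0 : (PySem.List.pyGet? (((PySem.List.enumerate df 0).filter
      (fun p => pvIsStart p.2)).map (·.1)) 0).getD 0 = ((s : Nat) : Int) := by
    rw [show (0 : Int) = ((0 : Nat) : Int) from rfl, PySem.List.pyGet?_natCast]
    rw [← List.head?_eq_getElem?]
    simp only [Nat.cast_zero]
    rw [hstart]; rfl
  simp only []
  rw [hget0]
  have hends := pvB_ends_head df (s + 1) (by omega)
  rw [show ((s : Nat) : Int) + 1 = ((s + 1 : Nat) : Int) by push_cast; ring]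
  rw [pvExtract_eq df s hs, List.drop_eq_getElem_cons hslen]
  cases hfi : (df.drop (s + 1)).findIdx? pvIsEnd with
  | some k =>
    rw [hfi, Option.map_some] at hends
    obtain ⟨rest, hrest⟩ : ∃ rest,
        ((PySem.List.pyRange ((s + 1 : Nat) : Int) (df.length : Int) 1).filter
          (fun j => pvIsEnd ((PySem.List.pyGet? df j).getD ""))) = ((s + 1 + k : Nat) : Int) :: rest := by
      cases hl : ((PySem.List.pyRange ((s + 1 : Nat) : Int) (df.length : Int) 1).filter
          (fun j => pvIsEnd ((PySem.List.pyGet? df j).getD ""))) with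
      | nil => rw [hl] at hends; simp at hends
      | cons e rest =>
        rw [hl] at hends
        simp only [List.head?_cons, Option.some_inj] at hends
        exact ⟨rest, by rw [hends]⟩
    rw [hrest]
    simp only []
    rw [show ((s + 1 + k : Nat) : Int) + 1 = ((s + k + 2 : Nat) : Int) by push_cast; ring]
    rw [PySem.List.slice_natCast]
    rw [show s + k + 2 - s = k + 2 by omega]
    rw [List.drop_eq_getElem_cons hslen, List.take_succ_cons]
    congr 1
    rw [pvTakeEnd_eq, hfi]
  | none =>
    rw [hfi, Option.map_none] at hends
    have hnil : ((PySem.List.pyRange ((s + 1 : Nat) : Int) (df.length : Int) 1).filter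
        (fun j => pvIsEnd ((PySem.List.pyGet? df j).getD ""))) = [] := by
      cases hl : ((PySem.List.pyRange ((s + 1 : Nat) : Int) (df.length : Int) 1).filter
          (fun j => pvIsEnd ((PySem.List.pyGet? df j).getD ""))) with
      | nil => rfl
      | cons e rest => rw [hl] at hends; simp at hends
    rw [hnil]
    simp only []
    rw [show (df.length : Int) - 1 + 1 = ((df.length : Nat) : Int) by ring]
    rw [PySem.List.slice_natCast]
    rw [List.drop_eq_getElem_cons hslen]
    rw [pvTakeEnd_eq, hfi]
    rw [List.take_of_length_le (by simp)]

-- ===== VERDICT (by name: the statement is the Claim_ definition above) =====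
theorem getMutableCode_spec : Claim_equal_getMutableCode := by
  intro df _ hp
  unfold Spec_getMutableCode
  rw [pvA_eq_extract df hp, pvB_eq_extract df hp]
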